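-- pv_equiv track=rewrite | github.com/zhudaxia666/shuati | LeetCode/刷题/砸金蛋兑积分.py | dui
-- ===== SOURCE A (Python) =====
-- def dui(l):
--     if l==[]:
--         return 0
--     if len(l)==1:
--         return l[0]
--     s=0
--     while len(l)!=0:
--         if len(l)==3:
--             i=1
--         else:
--             i=l.index(min(l))
--         if (i-1)==-1 and (i+1)==len(l):
--             s+=l[i]
--         elif (i-1)==-1 and (i+1)<len(l):
--             s+=l[i]*l[i+1]
--         elif (i-1)>-1 and (i+1)==len(l):
--             s+=l[i-1]*l[i]
--         else:
--             s+=l[i-1]*l[i]*l[i+1]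
--         l.pop(i)
--     return s
-- ===== SOURCE B (Python) =====
-- # B: precompute the removal order by one stable sort, then use a doubly-linked
-- # list (prev/next arrays) for O(1) neighbour lookup; closed forms for the last
-- # three survivors and for len <= 2.  (Note: A empties its argument in place; B
-- # does not mutate l -- the equivalence claimed is about the return value.)
-- def dui(l):
--     n = len(l)
--     if n == 0:
--         return 0
--     if n == 1:
--         return l[0]
--     if n == 2:
--         return l[0] * l[1] + max(l[0], l[1])
--     order = sorted(range(n), key=lambda i: l[i])
--     prev = list(range(-1, n - 1))
--     nxt = list(range(1, n + 1))
--     s = 0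
--     for i in order[:n - 3]:
--         p, q = prev[i], nxt[i]
--         if p == -1:
--             s += l[i] * l[q]
--         elif q == n:
--             s += l[p] * l[i]
--         else:
--             s += l[p] * l[i] * l[q]
--         if p >= 0:
--             nxt[p] = q
--         if q < n:
--             prev[q] = p
--     a, b, c = sorted(order[n - 3:])
--     return s + l[a] * l[b] * l[c] + l[a] * l[c] + max(l[a], l[c])
-- ===== Notes on version B (the rewrite author's own statement) =====
-- stated objective: faster
-- what changed: Instead of rescanning the whole list for the minimum and popping it each iteration (O(n) per step), B precomputes the removal order with one stable sort of the indices by value and walks it once, maintaining prev/next arrays (a doubly-linked list) for O(1) neighbour lookup and deletion, with closed forms for the last three survivors and for lists of length <= 2.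
import Mathlib
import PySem

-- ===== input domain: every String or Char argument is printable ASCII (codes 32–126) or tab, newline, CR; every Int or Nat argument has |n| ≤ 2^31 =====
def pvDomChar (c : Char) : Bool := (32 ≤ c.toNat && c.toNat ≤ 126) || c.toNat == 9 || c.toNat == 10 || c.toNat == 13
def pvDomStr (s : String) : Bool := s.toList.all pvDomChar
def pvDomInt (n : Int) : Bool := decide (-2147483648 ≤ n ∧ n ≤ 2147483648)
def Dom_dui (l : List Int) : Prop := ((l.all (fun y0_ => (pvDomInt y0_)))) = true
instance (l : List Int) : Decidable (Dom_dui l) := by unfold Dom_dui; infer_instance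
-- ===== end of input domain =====

-- B replaces A's repeated min-scan-and-pop with one stable index sort plus prev/next
-- arrays (a doubly-linked list) for neighbour lookup; A empties its argument list in
-- place while B does not mutate it — the equivalence proved is about the return value.

-- ===== PORT A =====
-- i = 1 if len(l) == 3 else l.index(min(l))
def duiIdx (l : List Int) : Int :=
  if l.length = 3 then 1
  else (((PySem.List.index? l ((PySem.List.min? l (fun x => x)).getD 0)).getD 0 : Nat) : Int)

-- the four neighbour-product branches of A's loop body
def duiAdd (l : List Int) (s : Int) : Int :=
  let i := duiIdx l
  if i - 1 = -1 ∧ i + 1 = PySem.List.len l then s + PySem.List.pyGetD l i 0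
  else if i - 1 = -1 ∧ i + 1 < PySem.List.len l then
    s + PySem.List.pyGetD l i 0 * PySem.List.pyGetD l (i + 1) 0
  else if i - 1 > -1 ∧ i + 1 = PySem.List.len l then
    s + PySem.List.pyGetD l (i - 1) 0 * PySem.List.pyGetD l i 0
  else s + PySem.List.pyGetD l (i - 1) 0 * PySem.List.pyGetD l i 0 * PySem.List.pyGetD l (i + 1) 0

-- the while loop of A: pops one element per iteration
def duiLoop (l : List Int) (s : Int) : Int :=
  if l = [] then s
  else
    match hp : PySem.List.pop? l (duiIdx l) with
    | some r => duiLoop r.2 (duiAdd l s)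
    | none => duiAdd l s   -- unreachable: the index is always valid
termination_by l.length
decreasing_by
  have := PySem.List.length_of_pop?_eq_some l hp
  omega

def dui (l : List Int) : Int :=
  if l = [] then 0
  else if l.length = 1 then PySem.List.pyGetD l 0 0
  else duiLoop l 0

-- ===== PORT B =====
-- one step of B's for-loop: unlink index i, adding its neighbour product
def duiStep (l : List Int) (n : Int) (st : Int × List Int × List Int) (i : Int) :
    Int × List Int × List Int :=
  let p := PySem.List.pyGetD st.2.1 i 0
  let q := PySem.List.pyGetD st.2.2 i 0
  let s :=
    if p = -1 then st.1 + PySem.List.pyGetD l i 0 * PySem.List.pyGetD l q 0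
    else if q = n then st.1 + PySem.List.pyGetD l p 0 * PySem.List.pyGetD l i 0
    else st.1 + PySem.List.pyGetD l p 0 * PySem.List.pyGetD l i 0 * PySem.List.pyGetD l q 0
  let nxt := if p ≥ 0 then PySem.List.pySetD st.2.2 p q else st.2.2
  let prev := if q < n then PySem.List.pySetD st.2.1 q p else st.2.1
  (s, prev, nxt)

def dui_alt (l : List Int) : Int :=
  let n := PySem.List.len l
  if n = 0 then 0
  else if n = 1 then PySem.List.pyGetD l 0 0
  else if n = 2 then
    PySem.List.pyGetD l 0 0 * PySem.List.pyGetD l 1 0 +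
      max (PySem.List.pyGetD l 0 0) (PySem.List.pyGetD l 1 0)
  else
    let order := PySem.List.sorted (PySem.List.pyRange 0 n) (fun i => PySem.List.pyGetD l i 0)
    let st := (PySem.List.slice order none (some (n - 3))).foldl (duiStep l n)
      (0, PySem.List.pyRange (-1) (n - 1), PySem.List.pyRange 1 (n + 1))
    match PySem.List.sorted (PySem.List.slice order (some (n - 3)) none) (fun i => i) with
    | [a, b, c] =>
        st.1 + PySem.List.pyGetD l a 0 * PySem.List.pyGetD l b 0 * PySem.List.pyGetD l c 0 +
          PySem.List.pyGetD l a 0 * PySem.List.pyGetD l c 0 +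
          max (PySem.List.pyGetD l a 0) (PySem.List.pyGetD l c 0)
    | _ => 0   -- unreachable: that slice always has exactly three elements

-- ===== PRECONDITION & SPEC =====
def Spec_dui (l : List Int) (out : Int) : Prop := out = dui_alt l
instance (l : List Int) (out : Int) : Decidable (Spec_dui l out) := by unfold Spec_dui; infer_instance

-- ===== CLAIM (what is proved, stated in full; the proofs are below) =====
def Claim_equal_dui : Prop := ∀ (l : List Int), Dom_dui l → Spec_dui l (dui l)

-- ===== LEMMAS AND PROOFS =====

-- value of the original list at an (alive) index
def fval (l : List Int) (i : Int) : Int := PySem.List.pyGetD l i 0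

-- strict removal priority: smaller value first, ties resolved by smaller index
def keyLt (l : List Int) (a b : Int) : Prop :=
  fval l a < fval l b ∨ (fval l a = fval l b ∧ a < b)

def headD (S : List Int) (b : Int) : Int := match S with | [] => b | j :: _ => j

def lastD (S : List Int) (a : Int) : Int := match S with | [] => a | x :: xs => lastD xs x

-- the doubly-linked-list invariant: walking the alive indices S with left sentinel a
-- and right sentinel b, the prev/next arrays point to the chain neighbours
def DLL (pr nx : List Int) : Int → Int → List Int → Prop
  | _, _, [] => True
  | a, b, i :: rest =>
      PySem.List.pyGetD pr i 0 = a ∧ PySem.List.pyGetD nx i 0 = headD rest b ∧ DLL pr nx i b rest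

-- the amount A adds when removing r whose alive neighbours are the last of S1 / head of S2
def contribA (l : List Int) (S1 S2 : List Int) (r : Int) : Int :=
  match S1, S2 with
  | [], _ => fval l r * fval l (headD S2 0)
  | _ :: _, [] => fval l (lastD S1 0) * fval l r
  | _ :: _, _ :: _ => fval l (lastD S1 0) * fval l r * fval l (headD S2 0)

theorem keyLt_asymm (l : List Int) {a b : Int} (h : keyLt l a b) : ¬ keyLt l b a := by
  rcases h with h | ⟨h1, h2⟩ <;> rintro (h' | ⟨h1', h2'⟩) <;> omega

theorem keyLt_irrefl (l : List Int) (a : Int) : ¬ keyLt l a a := by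
  rintro (h | ⟨h1, h2⟩) <;> omega

theorem getD_setD_self (xs : List Int) (i : Int) (v : Int) (h0 : 0 ≤ i)
    (h : i < (xs.length : Int)) : PySem.List.pyGetD (PySem.List.pySetD xs i v) i 0 = v := by
  rw [PySem.List.pySetD_of_nonneg xs v h0, PySem.List.pyGetD_of_nonneg _ _ h0]
  rw [List.getD_eq_getElem?_getD, List.getElem?_set_self]
  · simp
  · omega

theorem getD_setD_ne (xs : List Int) (i j v : Int) (hi : 0 ≤ i) (hj : 0 ≤ j) (hne : j ≠ i) :
    PySem.List.pyGetD (PySem.List.pySetD xs i v) j 0 = PySem.List.pyGetD xs j 0 := by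
  rw [PySem.List.pySetD_of_nonneg xs v hi, PySem.List.pyGetD_of_nonneg _ _ hj,
      PySem.List.pyGetD_of_nonneg _ _ hj]
  rw [List.getD_eq_getElem?_getD, List.getD_eq_getElem?_getD, List.getElem?_set_ne]
  omega

theorem lastD_mem : ∀ {S : List Int}, S ≠ [] → ∀ (a : Int), lastD S a ∈ S := by
  intro S
  induction S with
  | nil => simp
  | cons x xs ih =>
    intro _ a
    cases xs with
    | nil => simp [lastD]
    | cons y ys =>
      have := ih (by simp) x
      simp only [lastD] at this ⊢
      exact List.mem_cons_of_mem _ this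

theorem lastD_congr {S : List Int} (h : S ≠ []) (a a' : Int) : lastD S a = lastD S a' := by
  cases S with
  | nil => exact absurd rfl h
  | cons x xs => rfl

theorem headD_congr {S : List Int} (h : S ≠ []) (b b' : Int) : headD S b = headD S b' := by
  cases S with
  | nil => exact absurd rfl h
  | cons x xs => rfl

theorem lastD_eq_getLastD : ∀ (S : List Int) (a : Int), lastD S a = S.getLastD a := by
  intro S
  induction S with
  | nil => intro a; rfl
  | cons x xs ih => intro a; simp only [lastD, ih, List.getLastD_cons]

theorem lastD_getElem (S : List Int) (h : S ≠ []) (a : Int) :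
    lastD S a = S[S.length - 1]'(by cases S <;> simp_all) := by
  rw [lastD_eq_getLastD, List.getLastD_eq_getLast?, List.getLast?_eq_getElem?]
  simp [List.getElem?_eq_getElem (show S.length - 1 < S.length by cases S <;> simp_all)]

theorem erase_mid {α : Type} (as : List α) (b : α) (bs : List α) :
    (as ++ b :: bs).eraseIdx as.length = as ++ bs := by
  induction as with
  | nil => simp
  | cons a t ih => simp [ih]

theorem headD_append (t S2 : List Int) (b : Int) :
    headD (t ++ S2) b = headD t (headD S2 b) := by cases t <;> rfl

-- stability: sorting a strictly increasing list of indices by value yields a list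
-- strictly sorted by (value, index)
theorem insertBy_keyLt (l : List Int) (x : Int) :
    ∀ acc : List Int, acc.Pairwise (keyLt l) → (∀ y ∈ acc, y < x) →
      (PySem.List.insertBy (fun a b => decide (fval l a < fval l b)) x acc).Pairwise (keyLt l) := by
  intro acc
  induction acc with
  | nil => intro _ _; simp [PySem.List.insertBy]
  | cons y ys ih =>
    intro hpw hlt
    obtain ⟨hy, hys⟩ := List.pairwise_cons.mp hpw
    simp only [PySem.List.insertBy]
    by_cases h : fval l x < fval l y
    · simp only [h, decide_true, if_true]
      refine List.pairwise_cons.mpr ⟨?_, hpw⟩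
      intro z hz
      rcases List.mem_cons.mp hz with rfl | hz'
      · exact Or.inl h
      · rcases hy z hz' with h' | ⟨h1, h2⟩
        · exact Or.inl (lt_trans h h')
        · exact Or.inl (h1 ▸ h)
    · simp only [h, decide_false]
      refine List.pairwise_cons.mpr ⟨?_, ih hys (fun z hz => hlt z (by simp [hz]))⟩
      intro z hz
      rcases (PySem.List.mem_insertBy _ _ _ _).mp hz with rfl | hz'
      · rcases lt_or_eq_of_le (not_lt.mp h) with h' | h'
        · exact Or.inl h'
        · exact Or.inr ⟨h', hlt y (by simp)⟩
      · exact hy z hz'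

theorem sorted_keyLt (l : List Int) (xs : List Int) (hxs : xs.Pairwise (· < ·)) :
    (PySem.List.sorted xs (fun i => PySem.List.pyGetD l i 0)).Pairwise (keyLt l) := by
  rw [PySem.List.sorted_eq_foldl_insertBy]
  suffices h : ∀ (ys acc : List Int), ys.Pairwise (· < ·) → acc.Pairwise (keyLt l) →
      (∀ y ∈ acc, ∀ x ∈ ys, y < x) →
      (ys.foldl (fun acc x => PySem.List.insertBy (fun a b =>
        decide (PySem.List.pyGetD l a 0 < PySem.List.pyGetD l b 0)) x acc) acc).Pairwise (keyLt l) by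
    exact h xs [] hxs (by simp) (by simp)
  intro ys
  induction ys with
  | nil => intro acc _ h _; simpa using h
  | cons x t ih =>
    intro acc hpw hacc hcross
    obtain ⟨hx, ht⟩ := List.pairwise_cons.mp hpw
    simp only [List.foldl_cons]
    apply ih _ ht
    · exact insertBy_keyLt l x acc hacc (fun y hy => hcross y hy x (by simp))
    · intro y hy z hz
      rcases (PySem.List.mem_insertBy _ _ _ _).mp hy with rfl | hy'
      · exact hx z hz
      · exact hcross y hy' z (by simp [hz])

-- ==== A-side step facts ====

theorem min_of_keyMin (l : List Int) (S1 S2 : List Int) (r : Int)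
    (hmin : ∀ j ∈ S1 ++ r :: S2, ¬ keyLt l j r) :
    PySem.List.min? ((S1 ++ r :: S2).map (fval l)) (fun x => x) = some (fval l r) := by
  have hrmem : fval l r ∈ (S1 ++ r :: S2).map (fval l) := by
    exact List.mem_map_of_mem (by simp)
  cases hm : PySem.List.min? ((S1 ++ r :: S2).map (fval l)) (fun x => x) with
  | none =>
      rw [PySem.List.min?_eq_none_iff] at hm
      simp at hm
  | some m =>
      have h1 := PySem.List.min?_mem hm
      have h2 := PySem.List.min?_isMin hm (fval l r) hrmem
      obtain ⟨j, hj, rfl⟩ := List.mem_map.mp h1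
      have h3 : fval l r ≤ fval l j := by
        have := hmin j hj
        unfold keyLt at this
        omega
      have : fval l j = fval l r := le_antisymm h2 h3
      rw [this]

theorem index_of_keyMin (l : List Int) (S1 S2 : List Int) (r : Int)
    (hpw : (S1 ++ r :: S2).Pairwise (· < ·))
    (hmin : ∀ j ∈ S1 ++ r :: S2, ¬ keyLt l j r) :
    PySem.List.index? ((S1 ++ r :: S2).map (fval l)) (fval l r) = some S1.length := by
  rw [PySem.List.index?_eq_some_iff]
  refine ⟨S1.map (fval l), S2.map (fval l), by simp, by simp, ?_⟩
  intro hmem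
  obtain ⟨j, hj, hjv⟩ := List.mem_map.mp hmem
  have hjr : j < r := by
    rw [List.pairwise_append] at hpw
    exact hpw.2.2 j hj r (by simp)
  exact hmin j (by simp [hj]) (Or.inr ⟨hjv, hjr⟩)

theorem duiLoop_nil (s : Int) : duiLoop [] s = s := by rw [duiLoop]; simp

theorem duiLoop_some {l : List Int} {r : Int × List Int}
    (hp : PySem.List.pop? l (duiIdx l) = some r) (s : Int) :
    duiLoop l s = duiLoop r.2 (duiAdd l s) := by
  have hl : l ≠ [] := by rintro rfl; simp [PySem.List.pop?, PySem.List.pyIdx?, duiIdx] at hp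
  rw [duiLoop, if_neg hl]
  split
  · next r' hp' => rw [hp] at hp'; cases hp'; rfl
  · next hp' => rw [hp] at hp'; cases hp'

theorem min?_two (x y : Int) :
    PySem.List.min? [x, y] (fun v => v) = some (if y < x then y else x) := by
  simp [PySem.List.min?]
  split <;> rfl

theorem duiIdx_one (x : Int) : duiIdx [x] = 0 := by
  simp [duiIdx, PySem.List.min?, PySem.List.index?]

theorem duiIdx_two (x y : Int) : duiIdx [x, y] = if x ≤ y then 0 else 1 := by
  rw [duiIdx, if_neg (by simp), min?_two]
  by_cases h : x ≤ y
  · rw [if_pos h, if_neg (by omega)]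
    simp [PySem.List.index?, List.idxOf?, List.findIdx?, List.findIdx?.go]
  · rw [if_neg h, if_pos (by omega)]
    have hne : (x == y) = false := by simp; omega
    simp [PySem.List.index?, List.idxOf?, List.findIdx?, List.findIdx?.go, hne]

theorem duiLoop_one (x s : Int) : duiLoop [x] s = s + x := by
  rw [duiLoop_some (r := (x, [])) (by simp [duiIdx_one, PySem.List.pop?, PySem.List.pyIdx?]),
    duiLoop_nil]
  norm_num [duiAdd, duiIdx_one, PySem.List.len, PySem.List.pyGetD, PySem.List.pyGet?,
    PySem.List.pyIdx?]

theorem duiLoop_two (x y s : Int) : duiLoop [x, y] s = s + x * y + max x y := by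
  by_cases h : x ≤ y
  · rw [duiLoop_some (r := (x, [y]))
      (by simp [duiIdx_two, h, PySem.List.pop?, PySem.List.pyIdx?]), duiLoop_one]
    rw [max_eq_right h]
    norm_num [duiAdd, duiIdx_two, h, PySem.List.len, PySem.List.pyGetD, PySem.List.pyGet?,
      PySem.List.pyIdx?]
  · rw [duiLoop_some (r := (y, [x]))
      (by norm_num [duiIdx_two, h, PySem.List.pop?, PySem.List.pyIdx?]), duiLoop_one]
    rw [max_eq_left (by omega)]
    norm_num [duiAdd, duiIdx_two, h, PySem.List.len, PySem.List.pyGetD, PySem.List.pyGet?,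
      PySem.List.pyIdx?]

theorem duiLoop_three (x y z s : Int) :
    duiLoop [x, y, z] s = s + x * y * z + x * z + max x z := by
  have hidx : duiIdx [x, y, z] = 1 := by simp [duiIdx]
  rw [duiLoop_some (r := (y, [x, z])) (by rw [hidx]; rfl), duiLoop_two]
  have h0 : PySem.List.pyGetD [x, y, z] 0 0 = x := rfl
  have h1 : PySem.List.pyGetD [x, y, z] 1 0 = y := rfl
  have h2 : PySem.List.pyGetD [x, y, z] 2 0 = z := rfl
  have : duiAdd [x, y, z] s = s + x * y * z := by
    simp only [duiAdd, hidx, PySem.List.len]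
    norm_num [h0, h1, h2]
  rw [this]


theorem getElem_mid {α : Type} (as : List α) (b : α) (bs : List α) :
    (as ++ b :: bs)[as.length]'(by simp <;> omega) = b := by
  rw [List.getElem_append_right (le_refl as.length)]
  simp

theorem pyGetD_cons_zero (x d : Int) (xs : List Int) :
    PySem.List.pyGetD (x :: xs) (0 : Int) d = x := by
  rw [PySem.List.pyGetD_eq_getElem _ _ (le_refl 0) (by simp <;> omega)]
  simp

theorem pyGetD_cons_one (x y d : Int) (xs : List Int) :
    PySem.List.pyGetD (x :: y :: xs) (0 + 1 : Int) d = y := by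
  rw [PySem.List.pyGetD_eq_getElem _ _ (by omega) (by simp <;> omega)]
  simp

theorem pyGetD_append_mid (M1 M2 : List Int) (v d : Int) :
    PySem.List.pyGetD (M1 ++ v :: M2) (M1.length : Int) d = v := by
  rw [PySem.List.pyGetD_eq_getElem _ _ (by positivity) (by simp <;> omega)]
  simp only [Int.toNat_natCast]
  exact getElem_mid M1 v M2

theorem pyGetD_append_before (M1 rest : List Int) (hne : M1 ≠ []) (d : Int) :
    PySem.List.pyGetD (M1 ++ rest) ((M1.length : Int) - 1) d = lastD M1 0 := by
  have h1 : 1 ≤ M1.length := by cases M1 <;> simp_all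
  rw [show ((M1.length : Int) - 1) = ((M1.length - 1 : Nat) : Int) by omega]
  rw [PySem.List.pyGetD_eq_getElem _ _ (by positivity) (by simp <;> omega)]
  simp only [Int.toNat_natCast]
  rw [List.getElem_append_left (by omega)]
  rw [← lastD_getElem M1 hne 0]

theorem pyGetD_append_after (M1 : List Int) (v c d : Int) (t : List Int) :
    PySem.List.pyGetD (M1 ++ v :: c :: t) ((M1.length : Int) + 1) d = c := by
  rw [show ((M1.length : Int) + 1) = ((M1.length + 1 : Nat) : Int) by omega]
  rw [PySem.List.pyGetD_eq_getElem _ _ (by positivity) (by simp <;> omega)]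
  simp only [Int.toNat_natCast]
  rw [List.getElem_append_right (by omega)]
  simp

theorem lastD_map (g : Int → Int) : ∀ (S : List Int) (a : Int),
    lastD (S.map g) (g a) = g (lastD S a) := by
  intro S
  induction S with
  | nil => intro a; rfl
  | cons x xs ih => intro a; simp only [List.map_cons, lastD]; exact ih x

theorem duiAdd_eval (M1 M2 : List Int) (v s : Int)
    (hidx : duiIdx (M1 ++ v :: M2) = (M1.length : Int))
    (h4 : 4 ≤ (M1 ++ v :: M2).length) :
    duiAdd (M1 ++ v :: M2) s = s +
      (match M1, M2 with
       | [], _ => v * headD M2 0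
       | _ :: _, [] => lastD M1 0 * v
       | _ :: _, _ :: _ => lastD M1 0 * v * headD M2 0) := by
  simp only [List.length_append, List.length_cons] at h4
  rw [duiAdd]
  simp only [hidx, PySem.List.len, List.length_append, List.length_cons]
  cases M1 with
  | nil =>
    cases M2 with
    | nil => simp at h4
    | cons c t2 =>
      simp only [List.length_nil, Nat.cast_zero, List.nil_append, List.length_cons]
      rw [if_neg (by push_cast <;> omega), if_pos (by constructor <;> push_cast <;> omega)]
      rw [pyGetD_cons_zero, pyGetD_cons_one]
      rfl
  | cons a t1 =>
    cases M2 with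
    | nil =>
      rw [if_neg (by push_cast <;> simp <;> omega), if_neg (by push_cast <;> simp <;> omega),
        if_pos (by constructor <;> push_cast <;> simp <;> omega)]
      rw [pyGetD_append_before (a :: t1) _ (by simp), pyGetD_append_mid]
    | cons c t2 =>
      rw [if_neg (by push_cast <;> simp <;> omega), if_neg (by push_cast <;> simp <;> omega),
        if_neg (by push_cast <;> simp <;> omega)]
      rw [pyGetD_append_before (a :: t1) _ (by simp), pyGetD_append_mid, pyGetD_append_after]
      rfl

theorem A_step (l : List Int) (S1 S2 : List Int) (r s : Int)
    (hpw : (S1 ++ r :: S2).Pairwise (· < ·))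
    (hlen4 : 4 ≤ (S1 ++ r :: S2).length)
    (hmin : ∀ j ∈ S1 ++ r :: S2, ¬ keyLt l j r) :
    duiLoop ((S1 ++ r :: S2).map (fval l)) s =
      duiLoop ((S1 ++ S2).map (fval l)) (s + contribA l S1 S2 r) := by
  have hLlen : ((S1 ++ r :: S2).map (fval l)).length = S1.length + S2.length + 1 := by
    simp only [List.length_map, List.length_append, List.length_cons]; omega
  have hlen4' : 4 ≤ S1.length + S2.length + 1 := by
    simp only [List.length_append, List.length_cons] at hlen4; omega
  have hidx : duiIdx ((S1 ++ r :: S2).map (fval l)) = (S1.length : Int) := by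
    rw [duiIdx, if_neg (by omega), min_of_keyMin l S1 S2 r hmin, Option.getD_some,
      index_of_keyMin l S1 S2 r hpw hmin, Option.getD_some]
  have hmap : (S1 ++ r :: S2).map (fval l) = S1.map (fval l) ++ fval l r :: S2.map (fval l) := by
    simp
  have hidx' : duiIdx (S1.map (fval l) ++ fval l r :: S2.map (fval l)) =
      ((S1.map (fval l)).length : Int) := by
    rw [← hmap, hidx]; simp
  have hpop : PySem.List.pop? ((S1 ++ r :: S2).map (fval l)) (S1.length : Int) =
      some (fval l r, (S1 ++ S2).map (fval l)) := by
    rw [PySem.List.pop?_natCast _ _ (by omega)]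
    congr 1
    refine Prod.ext ?_ ?_
    · show ((S1 ++ r :: S2).map (fval l))[S1.length]'(by omega) = fval l r
      simp only [List.map_append, List.map_cons]
      have h := getElem_mid (S1.map (fval l)) (fval l r) (S2.map (fval l))
      simpa using h
    · show ((S1 ++ r :: S2).map (fval l)).eraseIdx S1.length = _
      simp only [List.map_append, List.map_cons]
      rw [show S1.length = (S1.map (fval l)).length by simp, erase_mid]
  rw [duiLoop_some (r := (fval l r, (S1 ++ S2).map (fval l))) (by rw [hidx]; exact hpop)]
  congr 1
  rw [hmap, duiAdd_eval _ _ _ _ hidx'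
    (by rw [← hmap]; simp only [List.length_map, List.length_append, List.length_cons]; omega)]
  congr 1
  cases S1 with
  | nil =>
    cases S2 with
    | nil => simp at hlen4'
    | cons c t2 => simp [contribA, headD]
  | cons a t1 =>
    cases S2 with
    | nil => simp only [List.map_nil, List.map_cons, contribA, lastD, headD, lastD_map]
    | cons c t2 => simp only [List.map_nil, List.map_cons, contribA, lastD, headD, lastD_map]


-- ==== B-side DLL facts ====

theorem dll_congr (pr nx pr' nx' : List Int) :
    ∀ (S : List Int) (a b : Int),
      (∀ i ∈ S, PySem.List.pyGetD pr' i 0 = PySem.List.pyGetD pr i 0) →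
      (∀ i ∈ S, PySem.List.pyGetD nx' i 0 = PySem.List.pyGetD nx i 0) →
      DLL pr nx a b S → DLL pr' nx' a b S := by
  intro S
  induction S with
  | nil => intro a b _ _ _; trivial
  | cons i rest ih =>
    intro a b hp hn hd
    obtain ⟨h1, h2, h3⟩ := hd
    exact ⟨by rw [hp i (by simp)]; exact h1, by rw [hn i (by simp)]; exact h2,
      ih i b (fun j hj => hp j (by simp [hj])) (fun j hj => hn j (by simp [hj])) h3⟩

theorem dll_append (pr nx : List Int) (S1 : List Int) :
    ∀ (S2 : List Int) (a b : Int),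
      DLL pr nx a b (S1 ++ S2) ↔
        DLL pr nx a (headD S2 b) S1 ∧ DLL pr nx (lastD S1 a) b S2 := by
  induction S1 with
  | nil => intro S2 a b; simp [DLL, lastD]
  | cons x t ih =>
    intro S2 a b
    simp only [List.cons_append, DLL, lastD, ih]
    rw [headD_append]
    tauto

theorem dll_retarget (pr nx : List Int) (q r : Int) :
    ∀ (S1 : List Int) (a : Int), S1 ≠ [] → S1.Nodup →
      (∀ i ∈ S1, 0 ≤ i ∧ i < (nx.length : Int)) →
      DLL pr nx a r S1 →
      DLL pr (PySem.List.pySetD nx (lastD S1 a) q) a q S1 := by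
  intro S1
  induction S1 with
  | nil => intro a h; exact absurd rfl h
  | cons x t ih =>
    intro a _ hnd hrange hd
    obtain ⟨h1, h2, h3⟩ := hd
    obtain ⟨hx0, hxlt⟩ := hrange x (by simp)
    cases t with
    | nil =>
      exact ⟨h1, by simpa [lastD, headD] using getD_setD_self nx x q hx0 hxlt, trivial⟩
    | cons y ys =>
      have hlm : lastD (y :: ys) x ∈ y :: ys := lastD_mem (by simp) x
      have hxne : x ≠ lastD (y :: ys) x := by
        intro hcontra
        exact (List.nodup_cons.mp hnd).1 (hcontra ▸ hlm)
      have hl0 : 0 ≤ lastD (y :: ys) x := (hrange _ (by simp [hlm])).1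
      refine ⟨h1, ?_, ?_⟩
      · show PySem.List.pyGetD (PySem.List.pySetD nx (lastD (y :: ys) x) q) x 0 = headD (y :: ys) q
        rw [getD_setD_ne nx _ _ q hl0 hx0 hxne, h2]
        exact headD_congr (by simp) r q
      · show DLL pr (PySem.List.pySetD nx (lastD (y :: ys) x) q) x q (y :: ys)
        exact ih x (by simp) (List.nodup_cons.mp hnd).2
          (fun i hi => hrange i (by simp [hi])) h3

theorem B_step (l : List Int) (S1 S2 : List Int) (r s : Int) (pr nx : List Int)
    (hpw : (S1 ++ r :: S2).Pairwise (· < ·))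
    (hrange : ∀ i ∈ S1 ++ r :: S2, 0 ≤ i ∧ i < (l.length : Int))
    (hlen4 : 4 ≤ (S1 ++ r :: S2).length)
    (hpr : pr.length = l.length) (hnx : nx.length = l.length)
    (hd : DLL pr nx (-1) (l.length : Int) (S1 ++ r :: S2)) :
    ∃ pr' nx',
      duiStep l (l.length : Int) (s, pr, nx) r = (s + contribA l S1 S2 r, pr', nx') ∧
      pr'.length = l.length ∧ nx'.length = l.length ∧
      DLL pr' nx' (-1) (l.length : Int) (S1 ++ S2) := by
  have hnd : (S1 ++ r :: S2).Nodup := hpw.imp (fun h => ne_of_lt h)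
  obtain ⟨hnd1, hnd2, hdisj⟩ := List.nodup_append.mp hnd
  rw [dll_append] at hd
  obtain ⟨hdS1, hpr_r, hnx_r, hdS2⟩ :
      DLL pr nx (-1) r S1 ∧ PySem.List.pyGetD pr r 0 = lastD S1 (-1) ∧
        PySem.List.pyGetD nx r 0 = headD S2 (l.length : Int) ∧
        DLL pr nx r (l.length : Int) S2 := by
    obtain ⟨h1, h2⟩ := hd
    exact ⟨by simpa [headD] using h1, h2.1, h2.2.1, h2.2.2⟩
  have hlen4' : 4 ≤ S1.length + S2.length + 1 := by
    simp only [List.length_append, List.length_cons] at hlen4; omega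
  have hstep : duiStep l (l.length : Int) (s, pr, nx) r =
      (if lastD S1 (-1) = -1 then
          s + fval l r * fval l (headD S2 (l.length : Int))
        else if headD S2 (l.length : Int) = (l.length : Int) then
          s + fval l (lastD S1 (-1)) * fval l r
        else s + fval l (lastD S1 (-1)) * fval l r * fval l (headD S2 (l.length : Int)),
       if headD S2 (l.length : Int) < (l.length : Int) then
          PySem.List.pySetD pr (headD S2 (l.length : Int)) (lastD S1 (-1)) else pr,
       if lastD S1 (-1) ≥ 0 then
          PySem.List.pySetD nx (lastD S1 (-1)) (headD S2 (l.length : Int)) else nx) := by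
    simp only [duiStep, hpr_r, hnx_r]
    rfl
  refine ⟨if headD S2 (l.length : Int) < (l.length : Int) then
      PySem.List.pySetD pr (headD S2 (l.length : Int)) (lastD S1 (-1)) else pr,
    if lastD S1 (-1) ≥ 0 then
      PySem.List.pySetD nx (lastD S1 (-1)) (headD S2 (l.length : Int)) else nx,
    ?_, ?_, ?_, ?_⟩
  · rw [hstep]
    congr 1
    -- the added amount is contribA
    cases S1 with
    | nil =>
      have hS2ne : S2 ≠ [] := by rintro rfl; simp at hlen4'
      rw [show lastD ([] : List Int) (-1) = -1 from rfl, if_pos rfl]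
      simp only [contribA]
      rw [headD_congr hS2ne (l.length : Int) 0]
    | cons a t1 =>
      have hlm : lastD (a :: t1) (-1) ∈ a :: t1 := lastD_mem (by simp) (-1)
      have hp0 : 0 ≤ lastD (a :: t1) (-1) :=
        (hrange _ (by simp only [List.mem_cons, List.mem_append] at hlm ⊢; tauto)).1
      rw [if_neg (by omega)]
      cases S2 with
      | nil =>
        rw [show headD ([] : List Int) (l.length : Int) = (l.length : Int) from rfl, if_pos rfl]
        simp only [contribA]
        rw [lastD_congr (S := a :: t1) (by simp) (-1) 0]
      | cons c t2 =>
        have hq := hrange c (by simp)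
        rw [show headD (c :: t2) (l.length : Int) = c from rfl, if_neg (by omega)]
        simp only [contribA, headD]
        rw [lastD_congr (S := a :: t1) (by simp) (-1) 0]
  · split <;> simp [PySem.List.length_pySetD, hpr]
  · split <;> simp [PySem.List.length_pySetD, hnx]
  · -- the updated arrays satisfy the invariant for the shrunken chain
    rw [dll_append]
    have hq0 : 0 ≤ headD S2 (l.length : Int) := by
      cases S2 with
      | nil =>
        rw [show headD ([] : List Int) (l.length : Int) = (l.length : Int) from rfl]
        positivity
      | cons c t2 => exact (hrange c (by simp)).1
    constructor
    · -- left part of the chain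
      cases S1 with
      | nil => trivial
      | cons a t1 =>
        have hne1 : (a :: t1) ≠ ([] : List Int) := by simp
        have hlm : lastD (a :: t1) (-1) ∈ a :: t1 := lastD_mem hne1 (-1)
        have hp0 : 0 ≤ lastD (a :: t1) (-1) :=
          (hrange _ (by simp only [List.mem_cons, List.mem_append] at hlm ⊢; tauto)).1
        have hret : DLL pr (PySem.List.pySetD nx (lastD (a :: t1) (-1)) (headD S2 (l.length : Int)))
            (-1) (headD S2 (l.length : Int)) (a :: t1) := by
          apply dll_retarget pr nx _ r (a :: t1) (-1) hne1 hnd1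
          · intro i hi
            have := hrange i (by simp only [List.mem_cons, List.mem_append] at hi ⊢; tauto)
            omega
          · exact hdS1
        rw [if_pos hp0]
        apply dll_congr pr _ _ _ _ _ _ ?_ (fun i _ => rfl) hret
        intro i hi
        split
        · next hlt =>
            cases S2 with
            | nil =>
              rw [show headD ([] : List Int) (l.length : Int) = (l.length : Int) from rfl] at hlt
              omega
            | cons c t2 =>
              have hine : i ≠ headD (c :: t2) (l.length : Int) := by
                rw [show headD (c :: t2) (l.length : Int) = c from rfl]
                exact hdisj i hi c (by simp)
              exact getD_setD_ne pr _ _ _ hq0 (hrange i (by simp only [List.mem_cons, List.mem_append] at hi ⊢; tauto)).1 hine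
        · rfl
    · -- right part of the chain
      cases S2 with
      | nil => trivial
      | cons c t2 =>
        have hc := hrange c (by simp)
        simp only [show headD (c :: t2) (l.length : Int) = c from rfl]
        have hnd2' : c ∉ t2 := by
          have h := List.nodup_cons.mp hnd2
          exact (List.nodup_cons.mp h.2).1
        refine ⟨?_, ?_, ?_⟩
        · -- prev of the new head is the last of S1
          rw [if_pos (show c < (l.length : Int) from hc.2)]
          exact getD_setD_self pr c _ hc.1 (by rw [hpr]; exact hc.2)
        -- (continued below)
        · -- next of the new head is unchanged
          have hread : PySem.List.pyGetD
              (if lastD S1 (-1) ≥ 0 then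
                PySem.List.pySetD nx (lastD S1 (-1)) c else nx)
              c 0 = PySem.List.pyGetD nx c 0 := by
            split
            · next hp0 =>
                have hlm : lastD S1 (-1) ∈ S1 := by
                  cases S1 with
                  | nil => simp [lastD] at hp0
                  | cons a t1 => exact lastD_mem (by simp) (-1)
                have hcne : c ≠ lastD S1 (-1) := by
                  intro hcon
                  exact (hdisj _ hlm c (by simp)) hcon.symm
                exact getD_setD_ne nx _ _ _ hp0 hc.1 hcne
            · rfl
          rw [hread]
          exact hdS2.2.1
        · -- tail of the chain is untouched
          apply dll_congr pr nx _ _ _ _ _ ?_ ?_ hdS2.2.2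
          · intro i hi
            split
            · next =>
                have hine : i ≠ c := by intro hcon; exact hnd2' (hcon ▸ hi)
                exact getD_setD_ne pr _ _ _ hc.1 (hrange i (by simp only [List.mem_cons, List.mem_append] at hi ⊢; tauto)).1 hine
            · rfl
          · intro i hi
            split
            · next hp0 =>
                have hlm : lastD S1 (-1) ∈ S1 := by
                  cases S1 with
                  | nil => simp [lastD] at hp0
                  | cons a t1 => exact lastD_mem (by simp) (-1)
                have hine : i ≠ lastD S1 (-1) := by
                  intro hcon
                  exact (hdisj _ hlm i (by simp [hi])) hcon.symm
                exact getD_setD_ne nx _ _ _ hp0 (hrange i (by simp only [List.mem_cons, List.mem_append] at hi ⊢; tauto)).1 hine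
            · rfl

theorem dll_init (l : List Int) :
    ∀ (k : Nat) (a : Int), a = (l.length : Int) - k → 0 ≤ a →
      DLL (PySem.List.pyRange (-1) ((l.length : Int) - 1)) (PySem.List.pyRange 1 ((l.length : Int) + 1))
        (a - 1) (l.length : Int) (PySem.List.pyRange a (l.length : Int)) := by
  intro k
  induction k with
  | zero =>
    intro a ha _
    have ha' : (l.length : Int) ≤ a := by push_cast at ha; omega
    rw [PySem.List.pyRange_one_eq_nil (a := a) (b := (l.length : Int)) ha']
    trivial
  | succ k ih =>
    intro a ha ha0
    have halt : a < (l.length : Int) := by omega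
    rw [PySem.List.pyRange_one_cons halt]
    have hlenpr : ((PySem.List.pyRange (-1) ((l.length : Int) - 1)).length : Int) = l.length := by
      rw [PySem.List.length_pyRange_one]; omega
    have hlennx : ((PySem.List.pyRange 1 ((l.length : Int) + 1)).length : Int) = l.length := by
      rw [PySem.List.length_pyRange_one]; omega
    refine ⟨?_, ?_, ?_⟩
    · rw [PySem.List.pyGetD_eq_getElem _ _ ha0 (by rw [hlenpr]; omega)]
      rw [PySem.List.getElem_pyRange_one]
      omega
    · rw [PySem.List.pyGetD_eq_getElem _ _ ha0 (by rw [hlennx]; omega)]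
      rw [PySem.List.getElem_pyRange_one]
      by_cases hc : a + 1 < (l.length : Int)
      · rw [PySem.List.pyRange_one_cons hc]
        simp only [headD]
        omega
      · rw [PySem.List.pyRange_one_eq_nil (by omega)]
        simp only [headD]
        omega
    · have h := ih (a + 1) (by omega) (by omega)
      simpa using h

-- ==== the bridge: A's loop = B's fold over the removal schedule ====

theorem bridge_base (l : List Int) (R S : List Int) (pr nx : List Int) (s : Int)
    (hperm : R.Perm S) (hS : S.Pairwise (· < ·)) (h3 : R.length = 3) :
    duiLoop (S.map (fval l)) s =
      (match PySem.List.sorted (R.drop (R.length - 3)) (fun i => i) with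
       | [a, b, c] =>
           ((R.take (R.length - 3)).foldl (duiStep l (l.length : Int)) (s, pr, nx)).1 +
             PySem.List.pyGetD l a 0 * PySem.List.pyGetD l b 0 * PySem.List.pyGetD l c 0 +
             PySem.List.pyGetD l a 0 * PySem.List.pyGetD l c 0 +
             max (PySem.List.pyGetD l a 0) (PySem.List.pyGetD l c 0)
       | _ => 0) := by
  have hS3 : S.length = 3 := by rw [← hperm.length_eq]; exact h3
  obtain ⟨a, b, c, rfl⟩ := List.length_eq_three.mp hS3
  have hsorted : PySem.List.sorted R (fun i => i) = [a, b, c] := by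
    apply PySem.List.eq_of_perm_of_pairwise_le_of_injective (fun i => i) (fun x y h => h)
    · exact (PySem.List.sorted_perm R (fun i => i) false).trans hperm
    · exact PySem.List.sorted_pairwise _ _
    · exact hS.imp le_of_lt
  rw [h3]
  simp only [Nat.sub_self, List.take_zero, List.foldl_nil, List.drop_zero]
  rw [hsorted]
  show duiLoop [fval l a, fval l b, fval l c] s = _
  rw [duiLoop_three]
  rfl

theorem bridge (l : List Int) :
    ∀ (R : List Int) (S : List Int) (pr nx : List Int) (s : Int),
      R.Pairwise (keyLt l) → R.Perm S → S.Pairwise (· < ·) →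
      (∀ i ∈ S, 0 ≤ i ∧ i < (l.length : Int)) →
      3 ≤ S.length → pr.length = l.length → nx.length = l.length →
      DLL pr nx (-1) (l.length : Int) S →
      duiLoop (S.map (fval l)) s =
        (match PySem.List.sorted (R.drop (R.length - 3)) (fun i => i) with
         | [a, b, c] =>
             ((R.take (R.length - 3)).foldl (duiStep l (l.length : Int)) (s, pr, nx)).1 +
               PySem.List.pyGetD l a 0 * PySem.List.pyGetD l b 0 * PySem.List.pyGetD l c 0 +
               PySem.List.pyGetD l a 0 * PySem.List.pyGetD l c 0 +
               max (PySem.List.pyGetD l a 0) (PySem.List.pyGetD l c 0)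
         | _ => 0) := by
  intro R
  induction R with
  | nil =>
    intro S pr nx s _ hperm _ _ h3 _ _ _
    have := hperm.length_eq
    simp at this
    omega
  | cons r R' ih =>
    intro S pr nx s hkey hperm hS hrange h3S hpr hnx hd
    by_cases h4 : 4 ≤ (r :: R').length
    · -- the generic step: remove r, the strict minimum
      have hrS : r ∈ S := hperm.subset (by simp)
      obtain ⟨S1, S2, rfl⟩ := List.append_of_mem hrS
      have hmin : ∀ j ∈ S1 ++ r :: S2, ¬ keyLt l j r := by
        intro j hj
        have hjR : j ∈ r :: R' := hperm.symm.subset hj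
        rcases List.mem_cons.mp hjR with rfl | hj'
        · exact keyLt_irrefl l j
        · exact keyLt_asymm l ((List.pairwise_cons.mp hkey).1 j hj')
      have hlen4S : 4 ≤ (S1 ++ r :: S2).length := by rw [← hperm.length_eq]; exact h4
      rw [A_step l S1 S2 r s hS hlen4S hmin]
      obtain ⟨pr', nx', hstep, hpr', hnx', hd'⟩ :=
        B_step l S1 S2 r s pr nx hS hrange hlen4S hpr hnx hd
      have hR'3 : 3 ≤ R'.length := by simp at h4; omega
      have htake : (r :: R').length - 3 = (R'.length - 3) + 1 := by simp; omega
      have hperm' : R'.Perm (S1 ++ S2) :=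
        (hperm.trans List.perm_middle).cons_inv
      have hsub : (S1 ++ S2).Sublist (S1 ++ r :: S2) :=
        (List.sublist_cons_self r S2).append_left S1
      have hS' : (S1 ++ S2).Pairwise (· < ·) := hS.sublist hsub
      have hrange' : ∀ i ∈ S1 ++ S2, 0 ≤ i ∧ i < (l.length : Int) :=
        fun i hi => hrange i (hsub.subset hi)
      have h3' : 3 ≤ (S1 ++ S2).length := by
        simp only [List.length_append, List.length_cons] at hlen4S ⊢
        omega
      have hmain := ih (S1 ++ S2) pr' nx' (s + contribA l S1 S2 r)
        (List.pairwise_cons.mp hkey).2 hperm' hS' hrange' h3' hpr' hnx' hd'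
      rw [hmain, htake]
      simp only [List.take_succ_cons, List.drop_succ_cons, List.foldl_cons, hstep]
    · -- exactly three left: the closed tail
      exact bridge_base l (r :: R') S pr nx s hperm hS
        (by
          have hl := hperm.length_eq
          simp only [List.length_cons] at h4 hl ⊢
          omega)

-- ===== VERDICT (by name: the statement is the Claim_ definition above) =====
theorem duiAlt_long (l : List Int) (h3 : 3 ≤ l.length) : dui l = dui_alt l := by
  have hne : l ≠ [] := by intro h; rw [h] at h3; simp at h3
  have hlen : PySem.List.len l = (l.length : Int) := rfl
  rw [dui, if_neg hne, if_neg (by omega)]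
  rw [dui_alt]
  simp only [hlen]
  rw [if_neg (by omega), if_neg (by omega), if_neg (by omega)]
  have hfv : (fun i => PySem.List.pyGetD l i 0) = fval l := rfl
  have hordlen : (PySem.List.sorted (PySem.List.pyRange 0 (l.length : Int))
      (fun i => PySem.List.pyGetD l i 0)).length = l.length := by
    rw [(PySem.List.sorted_perm _ _ _).length_eq, PySem.List.length_pyRange_one]
    omega
  simp only [PySem.List.slice_to _ (show (0 : Int) ≤ (l.length : Int) - 3 by omega),
    PySem.List.slice_from _ (show (0 : Int) ≤ (l.length : Int) - 3 by omega)]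
  simp only [show ((l.length : Int) - 3).toNat =
      (PySem.List.sorted (PySem.List.pyRange 0 (l.length : Int))
        (fun i => PySem.List.pyGetD l i 0)).length - 3 from by rw [hordlen]; omega]
  have hmap : (PySem.List.pyRange 0 (l.length : Int)).map (fval l) = l := by
    rw [← hfv]
    exact PySem.List.map_pyGetD_pyRange_zero l 0
  have hd0 := dll_init l l.length 0 (by push_cast; omega) le_rfl
  rw [show (0 : Int) - 1 = -1 from rfl] at hd0
  have h := bridge l
    (PySem.List.sorted (PySem.List.pyRange 0 (l.length : Int)) (fun i => PySem.List.pyGetD l i 0))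
    (PySem.List.pyRange 0 (l.length : Int))
    (PySem.List.pyRange (-1) ((l.length : Int) - 1))
    (PySem.List.pyRange 1 ((l.length : Int) + 1))
    0
    (sorted_keyLt l _ (PySem.List.pairwise_lt_pyRange_one _ _))
    (PySem.List.sorted_perm _ _ _)
    (PySem.List.pairwise_lt_pyRange_one _ _)
    (fun i hi => by
      have := PySem.List.mem_pyRange_one.mp hi
      exact ⟨this.1, this.2⟩)
    (by rw [PySem.List.length_pyRange_one]; omega)
    (by rw [PySem.List.length_pyRange_one]; omega)
    (by rw [PySem.List.length_pyRange_one]; omega)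
    hd0
  rw [hmap] at h
  exact h

theorem dui_spec : Claim_equal_dui := by
  intro l _
  show dui l = dui_alt l
  match l with
  | [] => rfl
  | [x] => rfl
  | [x, y] =>
    show duiLoop [x, y] 0 = _
    rw [duiLoop_two]
    show 0 + x * y + max x y =
      PySem.List.pyGetD [x, y] 0 0 * PySem.List.pyGetD [x, y] 1 0 +
        max (PySem.List.pyGetD [x, y] 0 0) (PySem.List.pyGetD [x, y] 1 0)
    norm_num [PySem.List.pyGetD, PySem.List.pyGet?, PySem.List.pyIdx?]
  | x :: y :: z :: rest => exact duiAlt_long _ (by simp)
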